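-- pv_equiv track=rewrite | github.com/DLatreyte/hugo-site-source | content/premieres-nsi/chap-01/1ère Spé NSI/Chap. 6 - Les boucles/chap-06-for.py | multiplication_multiple_sept
-- ===== SOURCE A (Python) =====
-- def multiplication_multiple_sept(a: int) -> str:
--     """
--     Calcule les 50 premiers termes de la table de a mais retourne
--     une chaîne de caractères contenant uniquement les multiples de 7.
--
--     >>> multiplication_multiple_sept(2)
--     '14 28 42 56 70 84 98 '
--     >>> multiplication_multiple_sept(9)
--     '63 126 189 252 315 378 441 '
--     """
--     reponse = ""  # Initialisation de la chaîne à retourner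
--     val_max_compteur = 50
--
--     for i in range(1, val_max_compteur + 1):
--         valeur = a * i
--         if valeur % 7 == 0:  # si multiple de 3
--             reponse += str(valeur) + " "   # ajouter valeur
--
--     return reponse
-- ===== SOURCE B (Python) =====
-- def multiplication_multiple_sept(a: int) -> str:
--     """Branch on 7 | a: if so every term of the table qualifies, otherwise
--     only the terms at i = 7, 14, ..., 49 do (7 is prime), so only those
--     are generated and joined."""
--     if a % 7 == 0:
--         return "".join(str(a * i) + " " for i in range(1, 51))
--     return "".join(str(a * i) + " " for i in range(7, 50, 7))
-- ===== Notes on version B (the rewrite author's own statement) =====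
-- stated objective: alternative
-- what changed: Instead of scanning all 50 products and filtering with % 7, B branches on whether 7 divides a and directly generates exactly the qualifying terms (all of i=1..50, or only i=7,14,...,49, using that 7 is prime), joining them without any divisibility test in the loop.
import Mathlib
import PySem

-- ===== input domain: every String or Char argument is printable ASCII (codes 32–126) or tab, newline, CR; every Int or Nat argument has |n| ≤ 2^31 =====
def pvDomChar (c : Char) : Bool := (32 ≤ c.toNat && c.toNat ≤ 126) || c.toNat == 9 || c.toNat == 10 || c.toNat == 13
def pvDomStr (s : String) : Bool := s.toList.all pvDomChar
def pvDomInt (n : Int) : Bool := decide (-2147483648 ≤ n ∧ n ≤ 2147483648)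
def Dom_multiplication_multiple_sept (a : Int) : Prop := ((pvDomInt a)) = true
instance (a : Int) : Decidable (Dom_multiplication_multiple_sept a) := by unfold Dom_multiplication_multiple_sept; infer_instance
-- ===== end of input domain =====

-- ===== PORT A =====
-- Literal port of A: fold i over range(1, 51), appending str(a*i) + " " when (a*i) % 7 == 0.
def multiplication_multiple_sept (a : Int) : String :=
  String.ofList ((PySem.List.pyRange 1 51 1).foldl
    (fun reponse i =>
      let valeur := a * i
      if PySem.Int.mod valeur 7 = 0 then reponse ++ PySem.Int.toChars valeur ++ [' '] else reponse)
    [])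

-- ===== PORT B =====
-- Port of B: branch on 7 | a; join str(a*i) + " " over range(1,51) or over range(7,50,7).
def multiplication_multiple_sept_alt (a : Int) : String :=
  if PySem.Int.mod a 7 = 0 then
    String.ofList (PySem.Chars.join [] ((PySem.List.pyRange 1 51 1).map (fun i => PySem.Int.toChars (a * i) ++ [' '])))
  else
    String.ofList (PySem.Chars.join [] ((PySem.List.pyRange 7 50 7).map (fun i => PySem.Int.toChars (a * i) ++ [' '])))

-- ===== PRECONDITION & SPEC =====
def Spec_multiplication_multiple_sept (a : Int) (out : String) : Prop := out = multiplication_multiple_sept_alt a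
instance (a : Int) (out : String) : Decidable (Spec_multiplication_multiple_sept a out) := by unfold Spec_multiplication_multiple_sept; infer_instance

-- ===== CLAIM (what is proved, stated in full; the proofs are below) =====
def Claim_equal_multiplication_multiple_sept : Prop := ∀ (a : Int), Dom_multiplication_multiple_sept a → Spec_multiplication_multiple_sept a (multiplication_multiple_sept a)

-- ===== LEMMAS AND PROOFS =====

-- 7 is a positive divisor, so Python's % (fmod) is zero exactly on multiples of 7.
theorem mod7_eq_zero_iff (x : Int) : PySem.Int.mod x 7 = 0 ↔ (7:Int) ∣ x := by
  simp only [PySem.Int.mod, Int.fmod_eq_emod]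
  rw [if_pos (Or.inl (by norm_num : (0:Int) ≤ 7)), add_zero]
  exact ⟨Int.dvd_of_emod_eq_zero, Int.emod_eq_zero_of_dvd⟩

theorem seven_dvd_mul (a i : Int) : (7:Int) ∣ a * i ↔ (7:Int) ∣ a ∨ (7:Int) ∣ i :=
  (by norm_num : Prime (7:Int)).dvd_mul

theorem flatMap_filter_if {α β : Type} (p : α → Bool) (g : α → List β) (l : List α) :
    l.flatMap (fun x => if p x then g x else []) = (l.filter p).flatMap g := by
  induction l with
  | nil => rfl
  | cons x xs ih => by_cases h : p x <;> simp [h, ih]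

theorem join_nil_flatten (parts : List (List Char)) :
    PySem.Chars.join [] parts = parts.flatten := by
  induction parts with
  | nil => rfl
  | cons p ps ih =>
    cases ps with
    | nil => simp [PySem.Chars.join_singleton]
    | cons q qs => rw [PySem.Chars.join_cons_cons]; simp_all

theorem join_nil_eq_flatMap {α : Type} (f : α → List Char) (l : List α) :
    PySem.Chars.join [] (l.map f) = l.flatMap f := by
  rw [join_nil_flatten, List.flatMap]

theorem fold_eq_flatMap (a : Int) :
    (PySem.List.pyRange 1 51 1).foldl
      (fun reponse i =>
        let valeur := a * i
        if PySem.Int.mod valeur 7 = 0 then reponse ++ PySem.Int.toChars valeur ++ [' '] else reponse)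
      []
    = ((PySem.List.pyRange 1 51 1).filter
        (fun i => decide (PySem.Int.mod (a * i) 7 = 0))).flatMap
        (fun i => PySem.Int.toChars (a * i) ++ [' ']) := by
  have h1 : (PySem.List.pyRange 1 51 1).foldl
      (fun reponse i =>
        let valeur := a * i
        if PySem.Int.mod valeur 7 = 0 then reponse ++ PySem.Int.toChars valeur ++ [' '] else reponse)
      []
      = (PySem.List.pyRange 1 51 1).foldl
      (fun reponse i =>
        reponse ++ (if decide (PySem.Int.mod (a * i) 7 = 0) then PySem.Int.toChars (a * i) ++ [' '] else []))
      [] := by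
    apply PySem.List.foldl_congr_mem
    intro acc x _
    by_cases hx : (7:Int) ∣ a * x <;> simp [hx]
  rw [h1, PySem.List.foldl_append_eq_flatMap, List.nil_append,
    flatMap_filter_if (fun i => decide (PySem.Int.mod (a * i) 7 = 0))]

-- the multiples of 7 among 1..50 are exactly range(7, 50, 7)
theorem filter_seven :
    (PySem.List.pyRange 1 51 1).filter (fun i => decide ((7:Int) ∣ i)) = PySem.List.pyRange 7 50 7 := by
  decide

-- ===== VERDICT (by name: the statement is the Claim_ definition above) =====
theorem multiplication_multiple_sept_spec : Claim_equal_multiplication_multiple_sept := by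
  intro a _
  unfold Spec_multiplication_multiple_sept multiplication_multiple_sept multiplication_multiple_sept_alt
  rw [fold_eq_flatMap]
  by_cases h : PySem.Int.mod a 7 = 0
  · rw [if_pos h, join_nil_eq_flatMap]
    have hd : (7:Int) ∣ a := (mod7_eq_zero_iff a).1 h
    rw [List.filter_eq_self.2 (fun i _ => by simp [seven_dvd_mul, hd])]
  · rw [if_neg h, join_nil_eq_flatMap]
    have hd : ¬ (7:Int) ∣ a := fun hh => h ((mod7_eq_zero_iff a).2 hh)
    rw [List.filter_congr (q := fun i => decide ((7:Int) ∣ i))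
        (fun i _ => by simp [seven_dvd_mul, hd]),
      filter_seven]
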